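-- pv_equiv track=rewrite | github.com/alexandraback/datacollection | solutions_5636311922769920_0/Python/SlowCoder/d.py | solve
-- ===== SOURCE A (Python) =====
-- def solve(K, C, S):
--     result = []
--
--     for p in range(0, K):
--         idx = 0
--         for exp in range(0, C):
--             idx += p * (K ** exp)
--
--         result.append(idx + 1)
--
--     return result
-- ===== SOURCE B (Python) =====
-- def solve(K, C, S):
--     if K <= 0:
--         return []
--     n = max(C, 0)
--     G = n if K == 1 else (K ** n - 1) // (K - 1)
--     return [p * G + 1 for p in range(K)]
-- ===== Notes on version B (the rewrite author's own statement) =====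
-- stated objective: faster
-- what changed: The inner loop summing p*K**exp over exp in range(C) is replaced by the closed-form geometric sum (K**C - 1)//(K - 1) (C when K == 1, [] when K <= 0), and the result is a single list comprehension.
import Mathlib
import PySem

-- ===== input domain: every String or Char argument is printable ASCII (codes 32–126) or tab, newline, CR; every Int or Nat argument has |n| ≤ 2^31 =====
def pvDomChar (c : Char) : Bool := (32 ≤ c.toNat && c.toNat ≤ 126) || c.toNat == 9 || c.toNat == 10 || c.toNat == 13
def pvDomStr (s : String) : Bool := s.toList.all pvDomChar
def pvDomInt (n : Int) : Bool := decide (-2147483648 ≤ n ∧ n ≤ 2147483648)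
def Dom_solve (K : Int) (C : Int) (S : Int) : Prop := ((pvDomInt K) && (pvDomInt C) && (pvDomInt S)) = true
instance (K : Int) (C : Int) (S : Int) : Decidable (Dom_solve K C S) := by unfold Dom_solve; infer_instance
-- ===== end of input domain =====

-- B replaces A's inner geometric-sum loop by the closed form (K^C - 1) // (K - 1) (C for K = 1): simpler, one comprehension.

-- ===== PORT A =====
def solve (K : Int) (C : Int) (S : Int) : List Int :=
  (PySem.List.pyRange 0 K 1).foldl
    (fun result p =>
      result ++ [((PySem.List.pyRange 0 C 1).foldl (fun idx exp => idx + p * K ^ exp.toNat) 0) + 1])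
    []

-- ===== PORT B =====
def solve_alt (K : Int) (C : Int) (S : Int) : List Int :=
  if K ≤ 0 then [] else
  let n : Int := max C 0
  let G : Int := if K = 1 then n else PySem.Int.floordiv (K ^ n.toNat - 1) (K - 1)
  (PySem.List.pyRange 0 K 1).map (fun p => p * G + 1)

-- ===== PRECONDITION & SPEC =====
def Spec_solve (K : Int) (C : Int) (S : Int) (out : List Int) : Prop := out = solve_alt K C S
instance (K : Int) (C : Int) (S : Int) (out : List Int) : Decidable (Spec_solve K C S out) := by unfold Spec_solve; infer_instance

-- ===== CLAIM (what is proved, stated in full; the proofs are below) =====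
def Claim_equal_solve : Prop := ∀ (K : Int) (C : Int) (S : Int), Dom_solve K C S → Spec_solve K C S (solve K C S)

-- ===== LEMMAS AND PROOFS =====

/-- Geometric partial sum Σ_{i<n} K^i. -/
def gs (K : Int) : Nat → Int
  | 0 => 0
  | n + 1 => gs K n + K ^ n

lemma gs_one (n : Nat) : gs 1 n = n := by
  induction n with
  | zero => simp [gs]
  | succ n ih => simp [gs, ih]

lemma gs_mul (K : Int) (n : Nat) : (K - 1) * gs K n = K ^ n - 1 := by
  induction n with
  | zero => simp [gs]
  | succ n ih => rw [gs, mul_add, ih, pow_succ]; ring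

lemma gs_closed (K : Int) (n : Nat) (h : K ≠ 1) :
    gs K n = PySem.Int.floordiv (K ^ n - 1) (K - 1) := by
  have hb : K - 1 ≠ 0 := by omega
  rw [← gs_mul K n, mul_comm, PySem.Int.floordiv]
  exact (Int.mul_fdiv_cancel _ hb).symm

lemma inner_fold (K p : Int) (n : Nat) (acc : Int) :
    ((List.range n).map (fun k : Nat => (k : Int))).foldl (fun idx e => idx + p * K ^ e.toNat) acc
      = acc + p * gs K n := by
  induction n generalizing acc with
  | zero => simp [gs]
  | succ n ih =>
      rw [List.range_succ, List.map_append, List.foldl_append, ih]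
      simp [gs]; ring

lemma inner_eq (K p C : Int) :
    (PySem.List.pyRange 0 C 1).foldl (fun idx exp => idx + p * K ^ exp.toNat) 0
      = p * gs K C.toNat := by
  rw [PySem.List.pyRange_one]
  have : (List.range (C - 0).toNat).map (fun k : Nat => (0 : Int) + k)
      = (List.range C.toNat).map (fun k : Nat => (k : Int)) := by simp
  rw [this, inner_fold]; ring

lemma foldl_append_map (l : List Int) (f : Int → Int) (init : List Int) :
    l.foldl (fun acc x => acc ++ [f x]) init = init ++ l.map f := by
  induction l generalizing init with
  | nil => simp
  | cons a t ih => simp [ih]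

lemma max_toNat (C : Int) : (max C 0).toNat = C.toNat := by omega

-- ===== VERDICT (by name: the statement is the Claim_ definition above) =====
theorem solve_spec : Claim_equal_solve := by
  intro K C S _
  unfold Spec_solve solve solve_alt
  by_cases hK : K ≤ 0
  · simp [hK, PySem.List.pyRange_one_eq_nil hK]
  simp only [hK, if_false]
  rw [foldl_append_map]
  simp only [List.nil_append]
  apply List.map_congr_left
  intro p _
  rw [inner_eq]
  by_cases h : K = 1
  · simp [h, gs_one]
  · simp [h, max_toNat, gs_closed K C.toNat h]
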